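-- pv_equiv track=rewrite | github.com/aleattene/advent-of-code | year_2021/day_17_trick_shot/solution_one_two.py | function
-- ===== SOURCE A (Python) =====
-- def function(target_x_min=124, target_x_max=174, target_y_min=-86, target_y_max=-123):
--     height_max = 0
--     good_throws = 0
--     for x_speed in range(target_x_max + 1):
--         for y_speed in range(target_y_max, -target_y_max):
--             # Initial Position: x = 0, y = 0, y_max = 0
--             x_position, y_position = 0, 0
--             tmp_y_max = 0
--             # Speed setting
--             test_x_speed = x_speed
--             test_y_speed = y_speed
--             while True:
--                 # Target passed
--                 if x_position > target_x_max or y_position < target_y_max: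
--                     break
--                 # Update positions (old position plus speed)
--                 x_position += test_x_speed
--                 y_position += test_y_speed
--                 tmp_y_max = max(y_position, tmp_y_max)
--                 # Target hit
--                 if target_x_min <= x_position <= target_x_max and target_y_max <= y_position <= target_y_min:
--                     height_max = max(height_max, tmp_y_max)
--                     good_throws += 1
--                     break
--                 # Update speed
--                 test_x_speed, test_y_speed = update_speed(test_x_speed, test_y_speed)
--     # Returns the max height and the number of times the target is hit
--     return height_max, good_throws
--
-- def update_speed(x_speed, y_speed):
--     # The vertical speed is always decreased by 1
--     y_speed -= 1
--     # If the horizontal speed is positive it is decreased by 1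
--     if x_speed > 0:
--         x_speed -= 1
--     # If the horizontal speed is negative it is increased by 1
--     elif x_speed < 0:
--         x_speed += 1
--     return x_speed, y_speed
-- ===== SOURCE B (Python) =====
-- def function(target_x_min=124, target_x_max=174, target_y_min=-86, target_y_max=-123):
--     # Decoupled axes: precompute, per y_speed, the in-band step indices (with the
--     # running-max height at that step) from closed forms; then for each x_speed take
--     # the first such step whose closed-form x position lands in the x band.
--     if target_x_max < 0:
--         # no candidate x speeds at all (range(target_x_max + 1) is empty)
--         return 0, 0
--     height_max = 0
--     good_throws = 0
--     for y_speed in range(target_y_max, -target_y_max):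
--         bound = 2 * max(y_speed, 0) - target_y_max + 2
--         steps = []
--         for k in range(1, bound + 1):
--             y = y_speed * k - k * (k - 1) // 2
--             if target_y_max <= y <= target_y_min:
--                 if y_speed >= 0 and k > y_speed:
--                     peak = y_speed * (y_speed + 1) // 2
--                 else:
--                     peak = max(0, y)
--                 steps.append((k, peak))
--         if not steps:
--             continue
--         for x_speed in range(target_x_max + 1):
--             for (k, peak) in steps:
--                 x = x_speed * (x_speed + 1) // 2
--                 if k < x_speed:
--                     x -= (x_speed - k) * (x_speed - k + 1) // 2
--                 if target_x_min <= x <= target_x_max: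
--                     height_max = max(height_max, peak)
--                     good_throws += 1
--                     break
--     return height_max, good_throws
-- ===== Notes on version B (the rewrite author's own statement) =====
-- stated objective: faster
-- what changed: Instead of simulating every (x_speed, y_speed) trajectory step by step, B decouples the axes: per y_speed it precomputes from closed forms the list of step indices whose y position is in the target band (with the running-max height at that step), then for each x_speed it only evaluates the closed-form x position at those few steps, taking the first in-band one.
import Mathlib
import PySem

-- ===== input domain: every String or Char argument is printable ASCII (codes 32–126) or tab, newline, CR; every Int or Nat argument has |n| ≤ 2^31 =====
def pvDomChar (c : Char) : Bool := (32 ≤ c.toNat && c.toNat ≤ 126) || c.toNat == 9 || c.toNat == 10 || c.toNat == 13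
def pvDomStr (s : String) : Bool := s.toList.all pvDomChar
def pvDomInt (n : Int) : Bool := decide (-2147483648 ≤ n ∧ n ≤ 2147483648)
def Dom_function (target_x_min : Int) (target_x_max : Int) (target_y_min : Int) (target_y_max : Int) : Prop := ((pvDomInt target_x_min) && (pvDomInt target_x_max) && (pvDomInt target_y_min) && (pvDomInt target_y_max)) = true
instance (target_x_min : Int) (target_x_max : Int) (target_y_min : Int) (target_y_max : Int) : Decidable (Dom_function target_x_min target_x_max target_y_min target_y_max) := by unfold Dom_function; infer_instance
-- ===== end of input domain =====

-- B replaces A's per-pair step-by-step trajectory simulation by a per-axis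
-- decomposition with closed-form positions (objective: faster).

-- ===== PORT A =====
def update_speed (x_speed y_speed : Int) : Int × Int :=
  let y_speed := y_speed - 1
  if x_speed > 0 then (x_speed - 1, y_speed)
  else if x_speed < 0 then (x_speed + 1, y_speed)
  else (x_speed, y_speed)

-- termination measure lemma for the loop below (cited by name in decreasing_by)
lemma simA_dec (target_y_max y_position test_y_speed : Int) (h : target_y_max ≤ y_position) :
    (y_position + test_y_speed - target_y_max + 1).toNat
        + (test_y_speed - 1).toNat * ((test_y_speed - 1).toNat + 1) + (test_y_speed - 1 + 1).toNat
      < (y_position - target_y_max + 1).toNat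
        + test_y_speed.toNat * (test_y_speed.toNat + 1) + (test_y_speed + 1).toNat := by
  rcases (by omega : test_y_speed ≤ 0 ∨ 0 < test_y_speed) with hs | hs
  · have e0 : test_y_speed.toNat = 0 := by omega
    have e0' : (test_y_speed - 1).toNat = 0 := by omega
    rw [e0, e0']
    simp only [Nat.zero_mul]
    omega
  · have e1 : test_y_speed.toNat = (test_y_speed - 1).toNat + 1 := by omega
    rw [e1]
    have e2 : ((test_y_speed - 1).toNat + 1) * ((test_y_speed - 1).toNat + 1 + 1)
        = (test_y_speed - 1).toNat * ((test_y_speed - 1).toNat + 1) + 2 * ((test_y_speed - 1).toNat + 1) := by ring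
    rw [e2]
    generalize (test_y_speed - 1).toNat * ((test_y_speed - 1).toNat + 1) = P
    omega

-- A's inner `while True` loop: returns `some tmp_y_max` on "target hit", `none` on "target passed".
def simA (target_x_min target_x_max target_y_min target_y_max x_position y_position test_x_speed test_y_speed tmp_y_max : Int) : Option Int :=
  if x_position > target_x_max ∨ y_position < target_y_max then none
  else
    let x' := x_position + test_x_speed
    let y' := y_position + test_y_speed
    let tmp' := max y' tmp_y_max
    if target_x_min ≤ x' ∧ x' ≤ target_x_max ∧ target_y_max ≤ y' ∧ y' ≤ target_y_min then some tmp'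
    else
      simA target_x_min target_x_max target_y_min target_y_max x' y'
        (update_speed test_x_speed test_y_speed).1 (update_speed test_x_speed test_y_speed).2 tmp'
termination_by ((y_position - target_y_max + 1).toNat + test_y_speed.toNat * (test_y_speed.toNat + 1) + (test_y_speed + 1).toNat)
decreasing_by
  rename_i hstop _
  have h2 : (update_speed test_x_speed test_y_speed).2 = test_y_speed - 1 := by
    unfold update_speed; split_ifs <;> rfl
  rw [h2]
  exact simA_dec target_y_max y_position test_y_speed (by omega)

def function (target_x_min : Int) (target_x_max : Int) (target_y_min : Int) (target_y_max : Int) : Int × Int :=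
  (PySem.List.pyRange 0 (target_x_max + 1) 1).foldl (fun st x_speed =>
    (PySem.List.pyRange target_y_max (-target_y_max) 1).foldl (fun st y_speed =>
      match simA target_x_min target_x_max target_y_min target_y_max 0 0 x_speed y_speed 0 with
      | some tmp => (max st.1 tmp, st.2 + 1)
      | none => st) st) (0, 0)

-- ===== PORT B =====
-- closed-form y position after k steps
def yB (y_speed k : Int) : Int := y_speed * k - PySem.Int.floordiv (k * (k - 1)) 2
-- running-max height at step k (Source B's `peak`)
def peakB (y_speed k : Int) : Int :=
  if y_speed ≥ 0 ∧ k > y_speed then PySem.Int.floordiv (y_speed * (y_speed + 1)) 2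
  else max 0 (yB y_speed k)
-- closed-form x position after k steps (Source B's `x`)
def xB (x_speed k : Int) : Int :=
  let x := PySem.Int.floordiv (x_speed * (x_speed + 1)) 2
  if k < x_speed then x - PySem.Int.floordiv ((x_speed - k) * (x_speed - k + 1)) 2 else x
-- Source B's inner `for (k, peak) in steps: … break` loop
def scanSteps (target_x_min target_x_max x_speed : Int) : List (Int × Int) → Option Int
  | [] => none
  | (k, peak) :: rest =>
      if target_x_min ≤ xB x_speed k ∧ xB x_speed k ≤ target_x_max then some peak
      else scanSteps target_x_min target_x_max x_speed rest

def function_alt (target_x_min : Int) (target_x_max : Int) (target_y_min : Int) (target_y_max : Int) : Int × Int :=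
  if target_x_max < 0 then (0, 0)
  else
  (PySem.List.pyRange target_y_max (-target_y_max) 1).foldl (fun st y_speed =>
    let bound := 2 * max y_speed 0 - target_y_max + 2
    let steps := (PySem.List.pyRange 1 (bound + 1) 1).foldl
      (fun acc k =>
        if target_y_max ≤ yB y_speed k ∧ yB y_speed k ≤ target_y_min then
          acc ++ [(k, peakB y_speed k)]
        else acc) []
    if steps = [] then st
    else
      (PySem.List.pyRange 0 (target_x_max + 1) 1).foldl (fun st2 x_speed =>
        match scanSteps target_x_min target_x_max x_speed steps with
        | some peak => (max st2.1 peak, st2.2 + 1)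
        | none => st2) st) (0, 0)

-- ===== PRECONDITION & SPEC =====
def Spec_function (target_x_min : Int) (target_x_max : Int) (target_y_min : Int) (target_y_max : Int) (out : Int × Int) : Prop := out = function_alt target_x_min target_x_max target_y_min target_y_max
instance (target_x_min : Int) (target_x_max : Int) (target_y_min : Int) (target_y_max : Int) (out : Int × Int) : Decidable (Spec_function target_x_min target_x_max target_y_min target_y_max out) := by unfold Spec_function; infer_instance

-- ===== CLAIM (what is proved, stated in full; the proofs are below) =====
def Claim_equal_function : Prop := ∀ (target_x_min : Int) (target_x_max : Int) (target_y_min : Int) (target_y_max : Int), Dom_function target_x_min target_x_max target_y_min target_y_max → Spec_function target_x_min target_x_max target_y_min target_y_max (function target_x_min target_x_max target_y_min target_y_max)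

-- ===== LEMMAS AND PROOFS =====

-- Pure per-axis sequences: position of x / y and the running max of y after k steps.
def Xp (xs : Int) : Nat → Int
  | 0 => 0
  | k+1 => Xp xs k + max (xs - k) 0

def Yp (ys : Int) : Nat → Int
  | 0 => 0
  | k+1 => Yp ys k + (ys - k)

def Tm (ys : Int) : Nat → Int
  | 0 => 0
  | k+1 => max (Yp ys (k+1)) (Tm ys k)

def hitB (txmin txmax tymin tymax xs ys : Int) (k : Nat) : Bool :=
  decide (txmin ≤ Xp xs k ∧ Xp xs k ≤ txmax ∧ tymax ≤ Yp ys k ∧ Yp ys k ≤ tymin)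

lemma Yp_closed (ys : Int) (k : Nat) : 2 * Yp ys k = 2 * ys * k - k * ((k : Int) - 1) := by
  induction k with
  | zero => simp [Yp]
  | succ n ih => simp only [Yp]; push_cast; push_cast at ih; linear_combination ih

lemma Xp_closed (xs : Int) (hxs : 0 ≤ xs) (k : Nat) :
    2 * Xp xs k = xs * (xs + 1) - (max (xs - k) 0) * (max (xs - k) 0 + 1) := by
  induction k with
  | zero =>
    have h : max (xs - ((0:Nat):Int)) 0 = xs := by simp; omega
    rw [h]; simp [Xp]
  | succ n ih =>
    simp only [Xp]
    rcases (by omega : xs - (n:Int) ≤ 0 ∨ 1 ≤ xs - (n:Int)) with h | h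
    · have h1 : max (xs - (n:Int)) 0 = 0 := by omega
      have h2 : max (xs - ((n+1:Nat):Int)) 0 = 0 := by push_cast; omega
      rw [h2]; rw [h1] at ih; push_cast; omega
    · have h1 : max (xs - (n:Int)) 0 = xs - n := by omega
      have h2 : max (xs - ((n+1:Nat):Int)) 0 = xs - n - 1 := by push_cast; omega
      rw [h2, h1]; rw [h1] at ih; linear_combination ih

lemma Xp_mono (xs : Int) {j k : Nat} (h : j ≤ k) : Xp xs j ≤ Xp xs k := by
  induction k, h using Nat.le_induction with
  | base => exact le_refl _
  | succ n hn ih => exact le_trans ih (by simp only [Xp]; omega)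

lemma Yp_nonneg_prefix (ys : Int) (hys : 0 ≤ ys) (k : Nat) (hk : (k : Int) ≤ ys + 1) :
    0 ≤ Yp ys k := by
  have hc := Yp_closed ys k
  have hk0 : (0:Int) ≤ (k:Int) := by positivity
  nlinarith [hc, hk0]

lemma Yp_tail_mono (ys : Int) {j m : Nat} (hj : ys ≤ (j : Int)) (hjm : j ≤ m) :
    Yp ys m ≤ Yp ys j := by
  induction m, hjm using Nat.le_induction with
  | base => exact le_refl _
  | succ n hn ih =>
    refine le_trans ?_ ih
    simp only [Yp]; omega

lemma Yp_below_stays (ys tymax : Int) (h1 : tymax ≤ ys) (h0 : tymax < 0)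
    {j m : Nat} (hj : Yp ys j < tymax) (hjm : j ≤ m) : Yp ys m < tymax := by
  have hys : ys ≤ (j : Int) := by
    by_contra hlt
    push Not at hlt
    rcases (by omega : (0:Int) ≤ ys ∨ ys < 0) with hpos | hneg
    · have := Yp_nonneg_prefix ys hpos j (by omega)
      omega
    · omega
  exact lt_of_le_of_lt (Yp_tail_mono ys hys hjm) hj

lemma Yp_le_apex (ys : Int) (hys : 0 ≤ ys) (k : Nat) : Yp ys k ≤ Yp ys ys.toNat := by
  have hc1 := Yp_closed ys k
  have hc2 := Yp_closed ys ys.toNat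
  have hy : (ys.toNat : Int) = ys := Int.toNat_of_nonneg hys
  rw [hy] at hc2
  have key : 0 ≤ ((k : Int) - ys) * ((k : Int) - ys - 1) := by
    rcases (by omega : (k : Int) - ys ≤ 0 ∨ 1 ≤ (k : Int) - ys) with h | h
    · have := mul_nonneg (by omega : (0:Int) ≤ -((k : Int) - ys)) (by omega : (0:Int) ≤ -((k : Int) - ys - 1))
      nlinarith [this]
    · exact mul_nonneg (by omega) (by omega)
  nlinarith [hc1, hc2, key]

lemma Yp_lt_of_big (ys tymax : Int) (h0 : tymax < 0) (k : Nat)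
    (hk : 2 * max ys 0 - tymax + 3 ≤ (k : Int)) : Yp ys k < tymax := by
  have hc := Yp_closed ys k
  have hm : ys ≤ max ys 0 ∧ 0 ≤ max ys 0 := ⟨le_max_left _ _, le_max_right _ _⟩
  have hk4 : (4:Int) ≤ (k : Int) := by omega
  have s1 : 2 * Yp ys k ≤ (k : Int) * (2 * max ys 0 - (k : Int) + 1) := by nlinarith [hm.1, hk4]
  have s2 : (k : Int) * (2 * max ys 0 - (k : Int) + 1) ≤ (k : Int) * (tymax - 2) := by
    have : 2 * max ys 0 - (k : Int) + 1 ≤ tymax - 2 := by omega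
    exact mul_le_mul_of_nonneg_left this (by omega)
  have s3 : (k : Int) * (tymax - 2) ≤ 4 * (tymax - 2) := by nlinarith [hk4]
  omega

lemma Tm_eq (ys : Int) (k : Nat) (hk : 1 ≤ k) :
    Tm ys k = if 0 ≤ ys ∧ ys < (k : Int) then Yp ys ys.toNat else max 0 (Yp ys k) := by
  induction k, hk using Nat.le_induction with
  | base =>
    have h1 : Yp ys 1 = ys := by simp [Yp]
    split_ifs with hc
    · have hz : ys = 0 := by push_cast at hc; omega
      subst hz
      simp [Tm, Yp]
    · simp [Tm, h1]; omega
  | succ n hn ih =>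
    have hstep : Tm ys (n+1) = max (Yp ys (n+1)) (Tm ys n) := rfl
    have hy : Yp ys (n+1) = Yp ys n + (ys - n) := rfl
    rcases (by omega : ys < 0 ∨ 0 ≤ ys) with hneg | hpos
    · have a1 : Yp ys n ≤ Yp ys 0 := Yp_tail_mono ys (by simp; omega) (by omega)
      have a2 : Yp ys (n+1) ≤ Yp ys 0 := Yp_tail_mono ys (by simp; omega) (by omega)
      simp only [Yp] at a1 a2
      rw [hstep, ih, if_neg (by omega), if_neg (by omega)]
      omega
    · rcases (by omega : (n : Int) < ys ∨ (n : Int) = ys ∨ ys < (n : Int)) with hlt | heq | hgt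
      · have a1 : 0 ≤ Yp ys n := Yp_nonneg_prefix ys hpos n (by omega)
        rw [hstep, hy, ih, if_neg (by omega), if_neg (by push_cast; omega)]
        omega
      · have a1 : 0 ≤ Yp ys n := Yp_nonneg_prefix ys hpos n (by omega)
        have htn : ys.toNat = n := by omega
        rw [hstep, hy, ih, if_neg (by omega), if_pos (by push_cast; omega), htn]
        omega
      · have a2 : Yp ys (n+1) ≤ Yp ys ys.toNat := Yp_le_apex ys hpos (n+1)
        rw [hstep, ih, if_pos (by omega), if_pos (by push_cast; omega)]
        omega

lemma even_consec (a : Int) : ∃ c : Int, a * (a + 1) = 2 * c := by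
  obtain ⟨c, hc⟩ := Int.even_mul_succ_self a
  exact ⟨c, by omega⟩

lemma yB_eq (ys : Int) (k : Nat) : yB ys (k : Int) = Yp ys k := by
  have hc := Yp_closed ys k
  obtain ⟨c, hc2⟩ := even_consec ((k : Int) - 1)
  have hprod : (k : Int) * ((k : Int) - 1) = 2 * c := by linear_combination hc2
  unfold yB
  rw [hprod, PySem.Int.floordiv_eq_ediv_of_pos (by norm_num),
    Int.mul_ediv_cancel_left c (by norm_num)]
  have hc' : 2 * Yp ys k = 2 * (ys * (k : Int)) - 2 * c := by linear_combination hc - hprod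
  omega

lemma xB_eq (xs : Int) (hxs : 0 ≤ xs) (k : Nat) : xB xs (k : Int) = Xp xs k := by
  have hc := Xp_closed xs hxs k
  obtain ⟨a, ha⟩ := even_consec xs
  obtain ⟨b, hb⟩ := even_consec (xs - (k : Int))
  simp only [xB]
  rw [ha, PySem.Int.floordiv_eq_ediv_of_pos (by norm_num),
    Int.mul_ediv_cancel_left a (by norm_num)]
  split_ifs with hklt
  · have hm : max (xs - (k : Int)) 0 = xs - (k : Int) := by omega
    rw [hm] at hc
    have hb' : (xs - (k:Int)) * (xs - (k:Int) + 1) = 2 * b := hb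
    rw [hb', PySem.Int.floordiv_eq_ediv_of_pos (by norm_num),
      Int.mul_ediv_cancel_left b (by norm_num)]
    omega
  · have hm : max (xs - (k : Int)) 0 = 0 := by omega
    rw [hm] at hc
    omega

lemma peakB_eq (ys : Int) (k : Nat) (hk : 1 ≤ k) : peakB ys (k : Int) = Tm ys k := by
  rw [Tm_eq ys k hk]
  unfold peakB
  rcases (by omega : ys < 0 ∨ 0 ≤ ys) with hneg | hpos
  · rw [if_neg (by omega), if_neg (by omega), yB_eq]
  · have hy : (ys.toNat : Int) = ys := Int.toNat_of_nonneg hpos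
    by_cases hgt : ys < (k : Int)
    · rw [if_pos ⟨hpos, hgt⟩, if_pos ⟨hpos, hgt⟩]
      obtain ⟨c, hc2⟩ := even_consec ys
      rw [hc2, PySem.Int.floordiv_eq_ediv_of_pos (by norm_num),
        Int.mul_ediv_cancel_left c (by norm_num)]
      have hcl := Yp_closed ys ys.toNat
      rw [hy] at hcl
      have : 2 * Yp ys ys.toNat = 2 * c := by linear_combination hcl + hc2
      omega
    · rw [if_neg (by tauto), if_neg (by tauto), yB_eq]

lemma upd_eq (vx vy : Int) (h : 0 ≤ vx) : update_speed vx vy = (max (vx - 1) 0, vy - 1) := by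
  unfold update_speed
  split_ifs <;> (refine Prod.ext ?_ rfl) <;> simp <;> omega

lemma simA_step (txmin txmax tymin tymax xs ys : Int) (k : Nat) (hxs : 0 ≤ xs)
    (hstop : ¬(Xp xs k > txmax ∨ Yp ys k < tymax)) :
    simA txmin txmax tymin tymax (Xp xs k) (Yp ys k) (max (xs - (k : Int)) 0) (ys - k) (Tm ys k)
      = if hitB txmin txmax tymin tymax xs ys (k+1) then some (Tm ys (k+1))
        else simA txmin txmax tymin tymax (Xp xs (k+1)) (Yp ys (k+1))
          (max (xs - ((k : Int) + 1)) 0) (ys - ((k : Int) + 1)) (Tm ys (k+1)) := by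
  conv_lhs => rw [simA]
  rw [if_neg hstop]
  have ex : Xp xs k + max (xs - (k : Int)) 0 = Xp xs (k+1) := rfl
  have ey : Yp ys k + (ys - (k : Int)) = Yp ys (k+1) := rfl
  simp only [ex, ey]
  rw [upd_eq _ _ (le_max_right _ _)]
  have e1 : max (max (xs - (k : Int)) 0 - 1) 0 = max (xs - ((k : Int) + 1)) 0 := by omega
  have e2 : ys - (k : Int) - 1 = ys - ((k : Int) + 1) := by ring
  simp only [e1, e2, hitB, decide_eq_true_eq]
  have etm : max (Yp ys (k+1)) (Tm ys k) = Tm ys (k+1) := rfl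
  rw [etm]

lemma simA_none (txmin txmax tymin tymax xs ys : Int) (hxs : 0 ≤ xs)
    (h1 : tymax ≤ ys) (h0 : tymax < 0)
    (hno : ∀ k : Nat, 1 ≤ k → hitB txmin txmax tymin tymax xs ys k = false) :
    ∀ (d j : Nat), 2 * max ys 0 - tymax + 3 ≤ (j : Int) + (d : Int) →
      simA txmin txmax tymin tymax (Xp xs j) (Yp ys j) (max (xs - (j : Int)) 0) (ys - j) (Tm ys j) = none := by
  intro d
  induction d with
  | zero =>
    intro j hj
    have hY := Yp_lt_of_big ys tymax h0 j (by push_cast at hj; omega)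
    rw [simA, if_pos (Or.inr hY)]
  | succ n ih =>
    intro j hj
    by_cases hstop : Xp xs j > txmax ∨ Yp ys j < tymax
    · rw [simA, if_pos hstop]
    · rw [simA_step txmin txmax tymin tymax xs ys j hxs hstop, hno (j+1) (by omega)]
      simp only [Bool.false_eq_true, if_false]
      exact ih (j+1) (by push_cast at hj ⊢; omega)

lemma simA_some (txmin txmax tymin tymax xs ys : Int) (hxs : 0 ≤ xs)
    (h1 : tymax ≤ ys) (h0 : tymax < 0) (k0 : Nat)
    (hhit : hitB txmin txmax tymin tymax xs ys (k0+1) = true)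
    (hmin : ∀ i : Nat, 1 ≤ i → i < k0 + 1 → hitB txmin txmax tymin tymax xs ys i = false) :
    ∀ (d j : Nat), j + d = k0 →
      simA txmin txmax tymin tymax (Xp xs j) (Yp ys j) (max (xs - (j : Int)) 0) (ys - j) (Tm ys j)
        = some (Tm ys (k0+1)) := by
  have hh := hhit
  rw [hitB, decide_eq_true_eq] at hh
  have hstop : ∀ j : Nat, j ≤ k0 → ¬(Xp xs j > txmax ∨ Yp ys j < tymax) := by
    intro j hjle
    rintro (hx | hy)
    · exact absurd (le_trans (Xp_mono xs (by omega : j ≤ k0 + 1)) hh.2.1) (by omega)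
    · exact absurd (Yp_below_stays ys tymax h1 h0 hy (by omega : j ≤ k0 + 1)) (by
        have := hh.2.2.1; omega)
  intro d
  induction d with
  | zero =>
    intro j hj
    have hj0 : j = k0 := by omega
    subst hj0
    rw [simA_step txmin txmax tymin tymax xs ys j hxs (hstop j le_rfl), hhit]
    simp
  | succ n ih =>
    intro j hj
    rw [simA_step txmin txmax tymin tymax xs ys j hxs (hstop j (by omega)),
      hmin (j+1) (by omega) (by omega)]
    simp only [Bool.false_eq_true, if_false]
    exact ih (j+1) (by omega)

lemma scan_none (txmin txmax tymin tymax xs ys : Int) (hxs : 0 ≤ xs)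
    (hno : ∀ k : Nat, 1 ≤ k → hitB txmin txmax tymin tymax xs ys k = false) :
    ∀ (n : Nat) (c : Int), 1 ≤ c → ((2 * max ys 0 - tymax + 2 + 1) - c).toNat = n →
      scanSteps txmin txmax xs
        (((PySem.List.pyRange c (2 * max ys 0 - tymax + 2 + 1) 1).filter
            (fun k => decide (tymax ≤ yB ys k ∧ yB ys k ≤ tymin))).map
          (fun k => (k, peakB ys k))) = none := by
  intro n
  induction n with
  | zero =>
    intro c hc1 hcn
    rw [PySem.List.pyRange_one_eq_nil (by omega)]
    rfl
  | succ n ih =>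
    intro c hc1 hcn
    rw [PySem.List.pyRange_one_cons (by omega)]
    have hcnat : ((c.toNat : Nat) : Int) = c := by omega
    by_cases hy : tymax ≤ yB ys c ∧ yB ys c ≤ tymin
    · rw [List.filter_cons_of_pos (by simpa using hy), List.map_cons]
      have hnohit := hno c.toNat (by omega)
      rw [hitB] at hnohit
      have hyY : tymax ≤ Yp ys c.toNat ∧ Yp ys c.toNat ≤ tymin := by
        rw [← yB_eq, hcnat]; exact hy
      have hx : ¬(txmin ≤ xB xs c ∧ xB xs c ≤ txmax) := by
        rw [← hcnat, xB_eq xs hxs]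
        intro hxc
        simp only [decide_eq_false_iff_not] at hnohit
        exact hnohit ⟨hxc.1, hxc.2, hyY.1, hyY.2⟩
      rw [scanSteps, if_neg hx]
      exact ih (c+1) (by omega) (by omega)
    · rw [List.filter_cons_of_neg (by simpa using hy)]
      exact ih (c+1) (by omega) (by omega)

lemma scan_some (txmin txmax tymin tymax xs ys : Int) (hxs : 0 ≤ xs)
    (h1 : tymax ≤ ys) (h0 : tymax < 0) (k0 : Nat)
    (hhit : hitB txmin txmax tymin tymax xs ys (k0+1) = true)
    (hmin : ∀ i : Nat, 1 ≤ i → i < k0 + 1 → hitB txmin txmax tymin tymax xs ys i = false) :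
    ∀ (n : Nat) (c : Int), 1 ≤ c → c ≤ ((k0+1 : Nat) : Int) → (((k0+1 : Nat) : Int) - c).toNat = n →
      scanSteps txmin txmax xs
        (((PySem.List.pyRange c (2 * max ys 0 - tymax + 2 + 1) 1).filter
            (fun k => decide (tymax ≤ yB ys k ∧ yB ys k ≤ tymin))).map
          (fun k => (k, peakB ys k))) = some (Tm ys (k0+1)) := by
  have hh := hhit
  rw [hitB, decide_eq_true_eq] at hh
  have hKb : ((k0 + 1 : Nat) : Int) ≤ 2 * max ys 0 - tymax + 2 := by
    by_contra hbig
    have := Yp_lt_of_big ys tymax h0 (k0+1) (by omega)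
    have := hh.2.2.1
    omega
  intro n
  induction n with
  | zero =>
    intro c hc1 hcK hcn
    have hcK' : c = ((k0 + 1 : Nat) : Int) := by omega
    subst hcK'
    rw [PySem.List.pyRange_one_cons (by omega)]
    have hy : tymax ≤ yB ys ((k0+1 : Nat) : Int) ∧ yB ys ((k0+1 : Nat) : Int) ≤ tymin := by
      rw [yB_eq]; exact ⟨hh.2.2.1, hh.2.2.2⟩
    rw [List.filter_cons_of_pos (by simpa using hy), List.map_cons]
    have hx : txmin ≤ xB xs ((k0+1 : Nat) : Int) ∧ xB xs ((k0+1 : Nat) : Int) ≤ txmax := by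
      rw [xB_eq xs hxs]; exact ⟨hh.1, hh.2.1⟩
    rw [scanSteps, if_pos hx, peakB_eq ys (k0+1) (by omega)]
  | succ n ih =>
    intro c hc1 hcK hcn
    have hclt : c < ((k0 + 1 : Nat) : Int) := by omega
    rw [PySem.List.pyRange_one_cons (by omega)]
    have hcnat : ((c.toNat : Nat) : Int) = c := by omega
    by_cases hy : tymax ≤ yB ys c ∧ yB ys c ≤ tymin
    · rw [List.filter_cons_of_pos (by simpa using hy), List.map_cons]
      have hnohit := hmin c.toNat (by omega) (by omega)
      rw [hitB] at hnohit
      have hyY : tymax ≤ Yp ys c.toNat ∧ Yp ys c.toNat ≤ tymin := by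
        rw [← yB_eq, hcnat]; exact hy
      have hx : ¬(txmin ≤ xB xs c ∧ xB xs c ≤ txmax) := by
        rw [← hcnat, xB_eq xs hxs]
        intro hxc
        simp only [decide_eq_false_iff_not] at hnohit
        exact hnohit ⟨hxc.1, hxc.2, hyY.1, hyY.2⟩
      rw [scanSteps, if_neg hx]
      exact ih (c+1) (by omega) (by omega) (by omega)
    · rw [List.filter_cons_of_neg (by simpa using hy)]
      exact ih (c+1) (by omega) (by omega) (by omega)

lemma pair_eq (txmin txmax tymin tymax xs ys : Int) (hxs : 0 ≤ xs)
    (h1 : tymax ≤ ys) (h2 : ys < -tymax) :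
    simA txmin txmax tymin tymax 0 0 xs ys 0
      = scanSteps txmin txmax xs
          (((PySem.List.pyRange 1 (2 * max ys 0 - tymax + 2 + 1) 1).filter
              (fun k => decide (tymax ≤ yB ys k ∧ yB ys k ≤ tymin))).map
            (fun k => (k, peakB ys k))) := by
  have h0 : tymax < 0 := by omega
  have hinit : simA txmin txmax tymin tymax 0 0 xs ys 0
      = simA txmin txmax tymin tymax (Xp xs 0) (Yp ys 0) (max (xs - ((0:Nat) : Int)) 0) (ys - (0:Nat)) (Tm ys 0) := by
    simp [Xp, Yp, Tm]
    rw [max_eq_left hxs]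
  rw [hinit]
  by_cases hex : ∃ k : Nat, hitB txmin txmax tymin tymax xs ys (k+1) = true
  · classical
    let k0 := Nat.find hex
    have hhit : hitB txmin txmax tymin tymax xs ys (k0+1) = true := Nat.find_spec hex
    have hmin : ∀ i : Nat, 1 ≤ i → i < k0 + 1 → hitB txmin txmax tymin tymax xs ys i = false := by
      intro i hi1 hik
      have := Nat.find_min hex (m := i - 1) (by omega)
      have hi : i - 1 + 1 = i := by omega
      rw [hi] at this
      exact Bool.not_eq_true _ ▸ (by simpa using this)
    rw [simA_some txmin txmax tymin tymax xs ys hxs h1 h0 k0 hhit hmin k0 0 (by omega),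
      scan_some txmin txmax tymin tymax xs ys hxs h1 h0 k0 hhit hmin
        (((k0+1 : Nat) : Int) - 1).toNat 1 (by omega) (by omega) (by omega)]
  · have hno : ∀ k : Nat, 1 ≤ k → hitB txmin txmax tymin tymax xs ys k = false := by
      intro k hk
      have : ¬ hitB txmin txmax tymin tymax xs ys ((k-1)+1) = true := fun hc => hex ⟨k-1, hc⟩
      have hke : k - 1 + 1 = k := by omega
      rw [hke] at this
      exact Bool.not_eq_true _ ▸ (by simpa using this)
    rw [simA_none txmin txmax tymin tymax xs ys hxs h1 h0 hno (2 * max ys 0 - tymax + 3).toNat 0 (by omega),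
      scan_none txmin txmax tymin tymax xs ys hxs hno (2 * max ys 0 - tymax + 2).toNat 1 (by omega) (by omega)]

lemma prod_perm (xr yr : List Int) (hx : xr.Nodup) (hy : yr.Nodup) :
    (xr.flatMap fun x => yr.map fun y => (x, y)).Perm
      (yr.flatMap fun y => xr.map fun x => (x, y)) := by
  have e1 : (xr.flatMap fun x => yr.map fun y => (x, y)) = xr ×ˢ yr := rfl
  have e2 : (yr.flatMap fun y => xr.map fun x => (x, y)) = (yr ×ˢ xr).map Prod.swap := by
    show _ = ((yr.flatMap fun y => xr.map fun x => (y, x)).map Prod.swap)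
    rw [List.map_flatMap]
    simp [List.map_map, Function.comp_def]
  rw [e1, e2]
  rw [List.perm_ext_iff_of_nodup (List.Nodup.product hx hy)
    ((List.Nodup.product hy hx).map Prod.swap_injective)]
  rintro ⟨a, b⟩
  simp only [List.mem_product, List.mem_map, Prod.exists, Prod.swap_prod_mk, Prod.mk.injEq]
  constructor
  · rintro ⟨ha, hb⟩; exact ⟨b, a, ⟨hb, ha⟩, rfl, rfl⟩
  · rintro ⟨p, q, ⟨hp, hq⟩, rfl, rfl⟩; exact ⟨hq, hp⟩

-- ===== VERDICT (by name: the statement is the Claim_ definition above) =====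
theorem function_spec : Claim_equal_function := by
  unfold Claim_equal_function Spec_function
  intro txmin txmax tymin tymax _
  unfold function function_alt
  simp only []
  rcases (by omega : txmax < 0 ∨ 0 ≤ txmax) with hneg | hpos
  · rw [if_pos hneg, PySem.List.pyRange_one_eq_nil (by omega : txmax + 1 ≤ 0)]
    rfl
  rw [if_neg (by omega)]
  have hA : (PySem.List.pyRange 0 (txmax + 1) 1).foldl (fun st x_speed =>
      (PySem.List.pyRange tymax (-tymax) 1).foldl (fun st y_speed =>
        match simA txmin txmax tymin tymax 0 0 x_speed y_speed 0 with
        | some tmp => (max st.1 tmp, st.2 + 1)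
        | none => st) st) ((0:Int), (0:Int))
      = ((PySem.List.pyRange 0 (txmax + 1) 1).flatMap fun x =>
          (PySem.List.pyRange tymax (-tymax) 1).map fun y => (x, y)).foldl
          (fun st p =>
            match simA txmin txmax tymin tymax 0 0 p.1 p.2 0 with
            | some tmp => (max st.1 tmp, st.2 + 1)
            | none => st) ((0:Int), (0:Int)) := by
    rw [List.foldl_flatMap]
    simp only [List.foldl_map]
  rw [hA]
  -- B side: drop the [] test, then rewrite the steps loop into filter/map form,
  -- then replace the per-pair scan by the per-pair simulation
  have hB : (PySem.List.pyRange tymax (-tymax) 1).foldl (fun st y_speed =>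
      let bound := 2 * max y_speed 0 - tymax + 2
      let steps := (PySem.List.pyRange 1 (bound + 1) 1).foldl
        (fun acc k =>
          if tymax ≤ yB y_speed k ∧ yB y_speed k ≤ tymin then
            acc ++ [(k, peakB y_speed k)]
          else acc) []
      if steps = [] then st
      else
        (PySem.List.pyRange 0 (txmax + 1) 1).foldl (fun st2 x_speed =>
          match scanSteps txmin txmax x_speed steps with
          | some peak => (max st2.1 peak, st2.2 + 1)
          | none => st2) st) ((0:Int), (0:Int))
      = (PySem.List.pyRange tymax (-tymax) 1).foldl (fun st y =>
          (PySem.List.pyRange 0 (txmax + 1) 1).foldl (fun st2 x =>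
            match simA txmin txmax tymin tymax 0 0 x y 0 with
            | some tmp => (max st2.1 tmp, st2.2 + 1)
            | none => st2) st) ((0:Int), (0:Int)) := by
    apply PySem.List.foldl_congr_mem
    intro st y hy
    have hymem := (PySem.List.mem_pyRange_one).mp hy
    simp only []
    rw [PySem.List.foldl_append_ite
      (p := fun k => tymax ≤ yB y k ∧ yB y k ≤ tymin)
      (f := fun k => (k, peakB y k))]
    simp only [List.nil_append]
    have hscan : ∀ st2 : Int × Int, (PySem.List.pyRange 0 (txmax + 1) 1).foldl (fun st2 x =>
        match scanSteps txmin txmax x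
          (((PySem.List.pyRange 1 (2 * max y 0 - tymax + 2 + 1) 1).filter
              (fun k => decide (tymax ≤ yB y k ∧ yB y k ≤ tymin))).map
            (fun k => (k, peakB y k))) with
        | some peak => (max st2.1 peak, st2.2 + 1)
        | none => st2) st2
        = (PySem.List.pyRange 0 (txmax + 1) 1).foldl (fun st2 x =>
            match simA txmin txmax tymin tymax 0 0 x y 0 with
            | some tmp => (max st2.1 tmp, st2.2 + 1)
            | none => st2) st2 := by
      intro st2
      apply PySem.List.foldl_congr_mem
      intro st3 x hx
      have hxmem := (PySem.List.mem_pyRange_one).mp hx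
      rw [← pair_eq txmin txmax tymin tymax x y (by omega) (by omega) (by omega)]
    split_ifs with hemp
    · rw [← hscan st]
      rw [hemp]
      have : ∀ (st3 : Int × Int) (x : Int),
          (match scanSteps txmin txmax x ([] : List (Int × Int)) with
            | some peak => (max st3.1 peak, st3.2 + 1)
            | none => st3) = st3 := fun _ _ => rfl
      simp only [this]
      exact (PySem.List.foldl_ignore _ _).symm
    · exact hscan st
  rw [hB]
  have hB2 : (PySem.List.pyRange tymax (-tymax) 1).foldl (fun st y =>
      (PySem.List.pyRange 0 (txmax + 1) 1).foldl (fun st2 x =>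
        match simA txmin txmax tymin tymax 0 0 x y 0 with
        | some tmp => (max st2.1 tmp, st2.2 + 1)
        | none => st2) st) ((0:Int), (0:Int))
      = ((PySem.List.pyRange tymax (-tymax) 1).flatMap fun y =>
          (PySem.List.pyRange 0 (txmax + 1) 1).map fun x => (x, y)).foldl
          (fun st p =>
            match simA txmin txmax tymin tymax 0 0 p.1 p.2 0 with
            | some tmp => (max st.1 tmp, st.2 + 1)
            | none => st) ((0:Int), (0:Int)) := by
    rw [List.foldl_flatMap]
    simp only [List.foldl_map]
  rw [hB2]
  apply List.Perm.foldl_eq'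
  · exact prod_perm _ _ (PySem.List.nodup_pyRange_one _ _) (PySem.List.nodup_pyRange_one _ _)
  · intro p _ q _ z
    cases h1 : simA txmin txmax tymin tymax 0 0 p.1 p.2 0 <;>
      cases h2 : simA txmin txmax tymin tymax 0 0 q.1 q.2 0 <;>
        simp [h1, h2, max_right_comm]
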